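/- GENERATED by mk_final_copies.py from the proof of the farm's unit `compute_accelerated_huffman` (farm:compute_accelerated_huffman.1: Proof.lean) as the
   re-elaboration sweep compiled it — do not edit. -/
import Asan.CheckWalk
import Vorbis.Spec.Units.compute_accelerated_huffman
import Vorbis.Spec.Worked.compute_accelerated_huffman_Lemmas

open X86 X86.User Asan Vorbis

set_option maxRecDepth 4000
set_option maxHeartbeats 4000000

/-- `compute_accelerated_huffman(c)` satisfies its contract: the prologue (six pushes, `sub rsp, 18H`) is walked here to the
head of the first loop; the three loops and the epilogue are `Vorbis.Spec.compute_accelerated_huffman.init_loop`,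
`.outer_loop`, `.inner_loop` of Lemmas.lean, over the shared facts `AccelEnv` (the precondition as check sites) and `AccelFrame` (what
every loop head knows). -/
theorem Vorbis.Spec.Worked.compute_accelerated_huffman_ok : Vorbis.Spec.compute_accelerated_huffman.Statement := by
  unfold Vorbis.Spec.compute_accelerated_huffman.Statement
  intro Lay hLay μ hμ u₀ hcode hstore2 hload1 hload4 hload8 hbr others frames Blk u ret he hpre
  v_entry he
  have hbr' := hbr others frames
  -- the precondition, as check sites over the raw field reads
  have hsh : ShadowPre others frames u := hpre.shadow
  obtain ⟨hbook, hwbook, hdense, hsparse⟩ := Vorbis.Spec.compute_accelerated_huffman.pre_facts hpre he_room he_top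
  have henv : Vorbis.Spec.compute_accelerated_huffman.AccelEnv Lay μ u₀ others frames u ret
      (u.mem.readLE (u.reg .rdi + 27) 1) (u.mem.readLE (u.reg .rdi + 4) 4) (u.mem.readLE (u.reg .rdi + 2112) 4)
      (u.mem.readLE (u.reg .rdi + 8) 8) (u.mem.readLE (u.reg .rdi + 40) 8) (u.mem.readLE (u.reg .rdi + 2096) 8) :=
    ⟨hLay, hμ, hcode, hstore2, hload1, hload4, hload8, hbr', hsh, he_ret_lt, he_align, he_room, he_top, he_stack, he_mx,
      hbook, hwbook, rfl, rfl, rfl, rfl, rfl, rfl, hdense, hsparse⟩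
  -- 0x1044a0 … 0x1044b7: the prologue, `rbx = c`, `i = 0`
  u_walk hcode [hμ.vendor] until [Vorbis.L.compute_accelerated_huffman.loop1] span [Vorbis.L.textLo, Vorbis.L.textHi] side (v_side)
  -- 0x1044d3, the head of the first loop: `Init` with `i = 0`
  have hsame : Mem.SameExcept [⟨(u.reg .rsp).toNat - 96, (u.reg .rsp).toNat⟩,
      ⟨(u.reg .rdi).toNat + 48, (u.reg .rdi).toNat + 2096⟩] u.mem s_1044b7.mem := by
    u_same
  have hun : ShadowUntouched u.mem s_1044b7.mem := by v_untouched
  have hs0 : UInt64.ofNat (s_1044b7.mem.readLE (u.reg .rsp) 8) = ret := by u_resolve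
  have hs1 : UInt64.ofNat (s_1044b7.mem.readLE (u.reg .rsp - 8) 8) = u.reg .r15 := by u_resolve
  have hs2 : UInt64.ofNat (s_1044b7.mem.readLE (u.reg .rsp - 16) 8) = u.reg .r14 := by u_resolve
  have hs3 : UInt64.ofNat (s_1044b7.mem.readLE (u.reg .rsp - 24) 8) = u.reg .r13 := by u_resolve
  have hs4 : UInt64.ofNat (s_1044b7.mem.readLE (u.reg .rsp - 32) 8) = u.reg .r12 := by u_resolve
  have hs5 : UInt64.ofNat (s_1044b7.mem.readLE (u.reg .rsp - 40) 8) = u.reg .rbp := by u_resolve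
  have hs6 : UInt64.ofNat (s_1044b7.mem.readLE (u.reg .rsp - 48) 8) = u.reg .rbx := by u_resolve
  have hdf : s_1044b7.flags .df = false := by
    rw [w_flags]
    simp only [X86.User.df_setStatus]
    exact he_df
  have hmx : s_1044b7.mxcsr &&& 0x1F80 = 0x1F80 := by
    rw [w_mxcsr]
    exact he_mx
  have hfr : Vorbis.Spec.compute_accelerated_huffman.AccelFrame u₀ u ret s_1044b7 :=
    ⟨w_rbx, w_rsp, Vorbis.Spec.compute_accelerated_huffman.kept_all u s_1044b7, w_eq, hdf, hmx, hsame, hun,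
      hs0, hs1, hs2, hs3, hs4, hs5, hs6⟩
  have hinit : Vorbis.Spec.compute_accelerated_huffman.Init u₀ u ret 0 s_1044b7 :=
    ⟨w_rip, hfr, w_r12, Nat.zero_le _, Codebook.FHInit.zero _ _⟩
  exact Vorbis.Spec.compute_accelerated_huffman.init_loop henv s_1044b7 ⟨0, hinit⟩
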